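-- pv_equiv track=rewrite | github.com/nseniow/Machine-Guided-Interactive-Clustering | interactive_constrained_clustering.py | create_constraint
-- ===== SOURCE A (Python) =====
-- def create_constraint(links):
--     '''
--     Takes a list of (index, index) lists.
--     Exports links to be symettric and linked based off of logic within links.
--
--     Input: [(40, 41), (42, 41)]
--     Output: [(40, 41), (41, 40), (42, 41), (41, 42), (40, 42), (42, 40)]
--
--     Input: [(40, 41), (42, 43)]
--     Output: [(40, 41), (41, 40), (42, 43), (43, 42)]
--     '''
--     final_link = []
--     for link in links:
--         final_link.append((int(link[0]), int(link[1])))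
--         final_link.append((int(link[1]), int(link[0])))
--     links_new = final_link.copy()
--     for link in links_new:
--         for link2 in links_new:
--             if link != link2 and link[1] == link2[0] and link[0] != link2[1] and (link[0], link2[1]) not in final_link:
--                 final_link.append((int(link[0]), int(link2[1])))
--                 final_link.append((int(link2[1]), int(link[0])))
--     return final_link
-- ===== SOURCE B (Python) =====
-- def create_constraint(links):
--     final_link = []
--     for a, b in links:
--         final_link.append((int(a), int(b)))
--         final_link.append((int(b), int(a)))
--     adj = {}
--     for x, y in final_link:
--         adj[x] = adj.get(x, []) + [y]
--     out = list(final_link)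
--     seen = set(final_link)
--     for a, b in final_link:
--         for c in adj.get(b, []):
--             if a != c and (a, c) not in seen:
--                 out.append((a, c))
--                 out.append((c, a))
--                 seen.add((a, c))
--                 seen.add((c, a))
--     return out
-- ===== Notes on version B (the rewrite author's own statement) =====
-- stated objective: faster
-- what changed: Replaces A's O(E^2) nested rescan of the symmetric edge list (with O(out) list-membership tests) by a one-pass adjacency dict indexed on first components plus an O(1) membership set, traversing only each edge's actual neighbours while emitting the same bridge pairs in the same order.
import Mathlib
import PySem

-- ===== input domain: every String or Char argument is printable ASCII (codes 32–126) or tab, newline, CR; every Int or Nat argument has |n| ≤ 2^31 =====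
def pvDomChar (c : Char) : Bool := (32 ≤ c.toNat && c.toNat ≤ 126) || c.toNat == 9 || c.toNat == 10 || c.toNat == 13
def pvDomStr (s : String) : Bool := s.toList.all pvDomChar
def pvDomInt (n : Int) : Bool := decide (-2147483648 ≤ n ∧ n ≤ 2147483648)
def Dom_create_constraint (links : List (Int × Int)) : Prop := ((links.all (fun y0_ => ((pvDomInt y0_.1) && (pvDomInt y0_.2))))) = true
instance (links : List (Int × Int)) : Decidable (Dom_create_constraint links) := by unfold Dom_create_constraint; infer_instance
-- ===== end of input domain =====

-- B replaces A's quadratic rescan of the symmetric edge list by an adjacency dict and a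
-- membership set built once, emitting the bridge pairs in the identical order (objective: faster).

-- ===== PORT A =====
def create_constraint (links : List (Int × Int)) : List (Int × Int) :=
  let final0 := links.foldl (fun acc l => acc ++ [(l.1, l.2), (l.2, l.1)]) []
  -- links_new = final_link.copy(); both nested loops run over this snapshot
  final0.foldl (fun fl link =>
    final0.foldl (fun fl link2 =>
      if link ≠ link2 ∧ link.2 = link2.1 ∧ link.1 ≠ link2.2 ∧ (link.1, link2.2) ∉ fl
      then fl ++ [(link.1, link2.2), (link2.2, link.1)]
      else fl) fl) final0

-- ===== PORT B =====
def create_constraint_alt (links : List (Int × Int)) : List (Int × Int) :=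
  let final0 := links.foldl (fun acc l => acc ++ [(l.1, l.2), (l.2, l.1)]) []
  let adj : PySem.Dict Int (List Int) :=
    final0.foldl (fun d p => d.modify p.1 [] (· ++ [p.2])) PySem.Dict.empty
  let st := final0.foldl (fun (st : List (Int × Int) × PySem.Set (Int × Int)) ab =>
      (adj.getD ab.2 []).foldl (fun st c =>
        if ab.1 ≠ c ∧ (ab.1, c) ∉ st.2
        then (st.1 ++ [(ab.1, c), (c, ab.1)],
              PySem.Set.add (PySem.Set.add st.2 (ab.1, c)) (c, ab.1))
        else st) st)
    (final0, PySem.Set.ofList final0)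
  st.1

-- ===== PRECONDITION & SPEC =====
def Spec_create_constraint (links : List (Int × Int)) (out : List (Int × Int)) : Prop := out = create_constraint_alt links
instance (links : List (Int × Int)) (out : List (Int × Int)) : Decidable (Spec_create_constraint links out) := by unfold Spec_create_constraint; infer_instance

-- ===== CLAIM (what is proved, stated in full; the proofs are below) =====
def Claim_equal_create_constraint : Prop := ∀ (links : List (Int × Int)), Dom_create_constraint links → Spec_create_constraint links (create_constraint links)

-- ===== LEMMAS AND PROOFS =====

-- A's inner step for the fixed outer edge (a, b)
def pvAstep (a b : Int) (fl : List (Int × Int)) (link2 : Int × Int) : List (Int × Int) :=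
  if (a, b) ≠ link2 ∧ b = link2.1 ∧ a ≠ link2.2 ∧ (a, link2.2) ∉ fl
  then fl ++ [(a, link2.2), (link2.2, a)] else fl

-- B's inner step for the fixed outer first component a
def pvBstep (a : Int) (st : List (Int × Int) × PySem.Set (Int × Int)) (c : Int) :
    List (Int × Int) × PySem.Set (Int × Int) :=
  if a ≠ c ∧ (a, c) ∉ st.2
  then (st.1 ++ [(a, c), (c, a)], PySem.Set.add (PySem.Set.add st.2 (a, c)) (c, a))
  else st

-- Inner loops agree: A's scan of cs guarded by link2.1 = b equals B's walk over the
-- b-neighbour list (cs filtered on first component b, second components), and the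
-- seen-set stays extensionally equal to the output list.
theorem pv_inner (a b : Int) (cs : List (Int × Int)) :
    ∀ (fl : List (Int × Int)) (seen : PySem.Set (Int × Int)),
    (∀ p, p ∈ seen ↔ p ∈ fl) →
    (((cs.filter (fun p => p.1 == b)).map (·.2)).foldl (pvBstep a) (fl, seen)).1
      = cs.foldl (pvAstep a b) fl ∧
    (∀ p, p ∈ (((cs.filter (fun p => p.1 == b)).map (·.2)).foldl (pvBstep a) (fl, seen)).2
      ↔ p ∈ cs.foldl (pvAstep a b) fl) := by
  induction cs with
  | nil => intro fl seen hinv; exact ⟨rfl, hinv⟩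
  | cons p cs ih =>
    intro fl seen hinv
    by_cases hp : p.1 = b
    · simp only [List.filter_cons, hp, beq_self_eq_true, if_true, List.map_cons, List.foldl_cons]
      by_cases hc : a ≠ p.2 ∧ (a, p.2) ∉ fl
      · have hcA : ((a, b) ≠ p ∧ b = p.1 ∧ a ≠ p.2 ∧ (a, p.2) ∉ fl) := by
          refine ⟨?_, hp.symm, hc.1, hc.2⟩
          intro h
          cases h
          exact hc.1 hp
        have hcB : (a ≠ p.2 ∧ (a, p.2) ∉ seen) := ⟨hc.1, fun h => hc.2 ((hinv _).1 h)⟩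
        rw [pvAstep, pvBstep, if_pos hcA, if_pos hcB]
        apply ih
        intro q
        simp only [PySem.Set.mem_add, hinv q, List.mem_append, List.mem_cons,
          List.not_mem_nil, or_false]
        tauto
      · have hcA : ¬ ((a, b) ≠ p ∧ b = p.1 ∧ a ≠ p.2 ∧ (a, p.2) ∉ fl) := by
          intro h; exact hc ⟨h.2.2.1, h.2.2.2⟩
        have hcB : ¬ (a ≠ p.2 ∧ (a, p.2) ∉ seen) := by
          intro h; exact hc ⟨h.1, fun hm => h.2 ((hinv _).2 hm)⟩
        rw [pvAstep, pvBstep, if_neg hcA, if_neg hcB]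
        exact ih fl seen hinv
    · have hf : (p.1 == b) = false := by simp [hp]
      have hA : pvAstep a b fl p = fl := by
        rw [pvAstep, if_neg]; intro h; exact hp h.2.1.symm
      simp only [List.filter_cons, hf, List.foldl_cons, hA]
      exact ih fl seen hinv

-- the adjacency dict looked up at b IS the b-neighbour list of the snapshot
theorem pv_adj (final0 : List (Int × Int)) (b : Int) :
    (final0.foldl (fun d p => d.modify p.1 [] (· ++ [p.2])) PySem.Dict.empty).getD b []
      = (final0.filter (fun p => p.1 == b)).map (·.2) := by
  rw [PySem.Dict.getD_foldl_modify_append, PySem.Dict.getD_empty]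
  simp

-- Outer loops agree, carrying the set/list invariant through
theorem pv_outer (final0 : List (Int × Int)) (ls : List (Int × Int)) :
    ∀ (fl : List (Int × Int)) (seen : PySem.Set (Int × Int)),
    (∀ p, p ∈ seen ↔ p ∈ fl) →
    (ls.foldl (fun st ab =>
        (((final0.foldl (fun d p => d.modify p.1 [] (· ++ [p.2])) PySem.Dict.empty).getD ab.2 []).foldl
          (pvBstep ab.1) st)) (fl, seen)).1
      = ls.foldl (fun fl link => final0.foldl (pvAstep link.1 link.2) fl) fl ∧
    (∀ p, p ∈ (ls.foldl (fun st ab =>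
        (((final0.foldl (fun d p => d.modify p.1 [] (· ++ [p.2])) PySem.Dict.empty).getD ab.2 []).foldl
          (pvBstep ab.1) st)) (fl, seen)).2
      ↔ p ∈ ls.foldl (fun fl link => final0.foldl (pvAstep link.1 link.2) fl) fl) := by
  induction ls with
  | nil => intro fl seen hinv; exact ⟨rfl, hinv⟩
  | cons ab ls ih =>
    intro fl seen hinv
    simp only [List.foldl_cons]
    rw [pv_adj final0 ab.2]
    obtain ⟨h1, h2⟩ := pv_inner ab.1 ab.2 final0 fl seen hinv
    have hX : (((final0.filter (fun p => p.1 == ab.2)).map (·.2)).foldl (pvBstep ab.1) (fl, seen))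
        = (final0.foldl (pvAstep ab.1 ab.2) fl,
           (((final0.filter (fun p => p.1 == ab.2)).map (·.2)).foldl (pvBstep ab.1) (fl, seen)).2) :=
      Prod.ext h1 rfl
    rw [hX]
    exact ih _ _ h2

-- ===== VERDICT (by name: the statement is the Claim_ definition above) =====
theorem create_constraint_spec : Claim_equal_create_constraint := by
  intro links _
  unfold Spec_create_constraint create_constraint create_constraint_alt
  set final0 := links.foldl (fun acc l => acc ++ [(l.1, l.2), (l.2, l.1)]) [] with hf0
  have hinv : ∀ p, p ∈ PySem.Set.ofList final0 ↔ p ∈ final0 :=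
    fun p => PySem.Set.mem_ofList final0 p
  have := pv_outer final0 final0 final0 (PySem.Set.ofList final0) hinv
  exact this.1.symm
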